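-- pv_equiv track=rewrite | github.com/lecyberbill/Pycnaptiq-AI | core/upscale_utils.py | get_tiles_coords
-- ===== SOURCE A (Python) =====
-- def get_tiles_coords(width, height, tile_size=512, overlap=64):
--     """
--     Calcule les coordonnées (x, y, w, h) de chaque tile pour couvrir l'image entière
--     avec un chevauchement donné.
--     """
--     coords = []
--
--     # On s'assure que tile_size n'est pas plus grand que l'image
--     tile_w = min(tile_size, width)
--     tile_h = min(tile_size, height)
--
--     # Calculer le pas (step)
--     stride = tile_size - overlap
--
--     y = 0
--     while y < height:
--         # Ajuster si on dépasse
--         actual_h = tile_h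
--         if y + actual_h > height:
--             y = height - actual_h
--
--         x = 0
--         while x < width:
--             actual_w = tile_w
--             if x + actual_w > width:
--                 x = width - actual_w
--
--             coords.append((x, y, actual_w, actual_h))
--
--             if x + actual_w >= width:
--                 break
--             x += stride
--
--         if y + actual_h >= height:
--             break
--         y += stride
--
--     return coords
-- ===== SOURCE B (Python) =====
-- def get_tiles_coords(width, height, tile_size=512, overlap=64):
--     """Tile coordinates covering the image with overlap: one 1D scan per axis,
--     then the cartesian product (y outer, x inner)."""
--     if width <= 0 or height <= 0:
--         return []
--     stride = tile_size - overlap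
--
--     def starts(size, tile):
--         res = []
--         s = 0
--         while s < size:
--             if s + tile > size:
--                 s = size - tile
--             res.append(s)
--             if s + tile >= size:
--                 break
--             s += stride
--         return res
--
--     tile_w = min(tile_size, width)
--     tile_h = min(tile_size, height)
--     xs = starts(width, tile_w)
--     ys = starts(height, tile_h)
--     return [(x, y, tile_w, tile_h) for y in ys for x in xs]
-- ===== Notes on version B (the rewrite author's own statement) =====
-- stated objective: simpler
-- what changed: Replaces A's nested 2D while-loops with a single 1D start-position scan per axis plus a cartesian product (y outer, x inner), computing the x-row once instead of once per row.
import Mathlib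
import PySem

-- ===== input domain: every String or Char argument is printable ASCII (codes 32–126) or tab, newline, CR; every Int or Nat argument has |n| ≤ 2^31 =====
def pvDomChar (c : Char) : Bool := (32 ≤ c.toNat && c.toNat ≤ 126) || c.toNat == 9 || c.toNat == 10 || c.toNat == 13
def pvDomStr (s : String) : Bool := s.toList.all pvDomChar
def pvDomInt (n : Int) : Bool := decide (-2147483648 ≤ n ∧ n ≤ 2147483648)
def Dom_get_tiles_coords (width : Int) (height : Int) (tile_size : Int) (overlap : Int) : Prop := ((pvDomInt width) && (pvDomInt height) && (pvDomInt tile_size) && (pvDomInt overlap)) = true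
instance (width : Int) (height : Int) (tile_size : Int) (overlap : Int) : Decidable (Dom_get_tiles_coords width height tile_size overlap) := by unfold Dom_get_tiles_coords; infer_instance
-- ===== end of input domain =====

-- B replaces A's nested 2D while-loops by one 1D start-position scan per axis plus a
-- cartesian product (simpler decomposition; the x-row is computed once, not once per row).

-- ===== PORT A =====
-- Python A's inner `while x < width` loop (fueled; whenever the Python loop terminates the fuel width.toNat+1
-- is never exhausted, since x grows by ≥ 1 per kept iteration or the loop breaks).
def pvAInner (width tile_w stride tile_h y : Int) : Int → Nat → List (Int × Int × Int × Int)
  | _, 0 => []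
  | x, Nat.succ f =>
    if x < width then
      let x' := if x + tile_w > width then width - tile_w else x
      (x', y, tile_w, tile_h) ::
        (if x' + tile_w ≥ width then [] else pvAInner width tile_w stride tile_h y (x' + stride) f)
    else []

-- Python A's outer `while y < height` loop (fueled likewise).
def pvAOuter (width height tile_w tile_h stride : Int) : Int → Nat → List (Int × Int × Int × Int)
  | _, 0 => []
  | y, Nat.succ f =>
    if y < height then
      let y' := if y + tile_h > height then height - tile_h else y
      pvAInner width tile_w stride tile_h y' 0 (width.toNat + 1) ++
        (if y' + tile_h ≥ height then []
         else pvAOuter width height tile_w tile_h stride (y' + stride) f)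
    else []

def get_tiles_coords (width : Int) (height : Int) (tile_size : Int) (overlap : Int) : List (Int × Int × Int × Int) :=
  let tile_w := min tile_size width
  let tile_h := min tile_size height
  let stride := tile_size - overlap
  pvAOuter width height tile_w tile_h stride 0 (height.toNat + 1)

-- ===== PORT B =====
-- Source B's `starts(size, tile)`: the 1D list of start positions along one axis (fueled).
def pvBStarts (size tile stride : Int) : Int → Nat → List Int
  | _, 0 => []
  | s, Nat.succ f =>
    if s < size then
      let s' := if s + tile > size then size - tile else s
      s' :: (if s' + tile ≥ size then [] else pvBStarts size tile stride (s' + stride) f)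
    else []

def get_tiles_coords_alt (width : Int) (height : Int) (tile_size : Int) (overlap : Int) : List (Int × Int × Int × Int) :=
  if width ≤ 0 ∨ height ≤ 0 then []
  else
    let stride := tile_size - overlap
    let tile_w := min tile_size width
    let tile_h := min tile_size height
    let xs := pvBStarts width tile_w stride 0 (width.toNat + 1)
    let ys := pvBStarts height tile_h stride 0 (height.toNat + 1)
    ys.flatMap (fun y => xs.map (fun x => (x, y, tile_w, tile_h)))

-- ===== PRECONDITION & SPEC =====
def Spec_get_tiles_coords (width : Int) (height : Int) (tile_size : Int) (overlap : Int) (out : List (Int × Int × Int × Int)) : Prop := out = get_tiles_coords_alt width height tile_size overlap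
instance (width : Int) (height : Int) (tile_size : Int) (overlap : Int) (out : List (Int × Int × Int × Int)) : Decidable (Spec_get_tiles_coords width height tile_size overlap out) := by unfold Spec_get_tiles_coords; infer_instance

-- ===== CLAIM (what is proved, stated in full; the proofs are below) =====
def Claim_equal_get_tiles_coords : Prop := ∀ (width : Int) (height : Int) (tile_size : Int) (overlap : Int), Dom_get_tiles_coords width height tile_size overlap → Spec_get_tiles_coords width height tile_size overlap (get_tiles_coords width height tile_size overlap)

-- ===== LEMMAS AND PROOFS =====

-- A's inner loop is B's 1D scan with the row data attached.
theorem pvInner_eq (width tile_w stride tile_h y : Int) :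
    ∀ (f : Nat) (x : Int),
      pvAInner width tile_w stride tile_h y x f
        = (pvBStarts width tile_w stride x f).map (fun s => (s, y, tile_w, tile_h)) := by
  intro f
  induction f with
  | zero => intro x; simp [pvAInner, pvBStarts]
  | succ f ih =>
    intro x
    simp only [pvAInner, pvBStarts]
    split_ifs <;> simp [ih]

-- A's nested loops are the cartesian product of the two 1D scans.
theorem pvOuter_eq (width height tile_w tile_h stride : Int) :
    ∀ (f : Nat) (y : Int),
      pvAOuter width height tile_w tile_h stride y f
        = (pvBStarts height tile_h stride y f).flatMap
            (fun y => (pvBStarts width tile_w stride 0 (width.toNat + 1)).map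
              (fun x => (x, y, tile_w, tile_h))) := by
  intro f
  induction f with
  | zero => intro y; simp [pvAOuter, pvBStarts]
  | succ f ih =>
    intro y
    simp only [pvAOuter, pvInner_eq]
    generalize hxs : pvBStarts width tile_w stride 0 (width.toNat + 1) = xs
    simp only [hxs] at ih
    conv_rhs => rw [pvBStarts]
    split_ifs <;> simp [ih]
    · intro x _
      exfalso; omega
    · intro x h _
      exfalso; omega
    · rw [if_neg (by omega)]

theorem pvBStarts_nonpos (size tile stride : Int) (h : size ≤ 0) (f : Nat) :
    pvBStarts size tile stride 0 f = [] := by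
  cases f with
  | zero => simp [pvBStarts]
  | succ f =>
    simp only [pvBStarts]
    rw [if_neg]; omega

-- ===== VERDICT (by name: the statement is the Claim_ definition above) =====
theorem get_tiles_coords_spec : Claim_equal_get_tiles_coords := by
  intro width height tile_size overlap _
  unfold Spec_get_tiles_coords get_tiles_coords get_tiles_coords_alt
  simp only [pvOuter_eq]
  by_cases hw : width ≤ 0 ∨ height ≤ 0
  · rw [if_pos hw]
    rcases hw with hw | hh
    · have hx : width.toNat = 0 := Int.toNat_of_nonpos hw
      simp [pvBStarts, List.flatMap, not_lt.mpr hw, List.flatMap]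
    · rw [pvBStarts_nonpos _ _ _ hh]; simp [List.flatMap]
  · rw [if_neg hw]
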